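-- pv_equiv track=rewrite | github.com/farodoc/Algorithms-and-Data-Structures-AGH-UST | Random tasks/Zestaw 4/10.py | zad10
-- ===== SOURCE A (Python) =====
-- def czyCyfra0(liczba):
--     if liczba < 0:
--         liczba *= -1
--
--     while liczba > 0:
--         if liczba % 10 == 0:
--             return True
--
--         liczba //= 10
--
--     return False
--
-- def zad10(t):
--     n = len(t[0])
--
--     zeraW = [False for _ in range(n)]
--     zeraK = [False for _ in range(n)]
--
--     for i in range(n):
--         for j in range(n):
--             if czyCyfra0(t[i][j]):
--                 zeraW[i] = True
--                 zeraK[j] = True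
--
--     if False in zeraK or False in zeraW:
--         return False
--
--     return True
-- ===== SOURCE B (Python) =====
-- def czyCyfra0(liczba):
--     liczba = abs(liczba)
--     while liczba > 0:
--         if liczba % 10 == 0:
--             return True
--         liczba //= 10
--     return False
--
-- def zad10(t):
--     n = len(t[0])
--     return (all(any(czyCyfra0(t[i][j]) for j in range(n)) for i in range(n))
--             and all(any(czyCyfra0(t[i][j]) for i in range(n)) for j in range(n)))
-- ===== Notes on version B (the rewrite author's own statement) =====
-- stated objective: simpler
-- what changed: A's single fused n*n scan that maintains two mutable flag arrays zeraW/zeraK and then searches them for False is replaced by two independent short-circuiting all/any existence passes (one over rows, one over columns) whose conjunction is returned.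
import Mathlib
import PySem

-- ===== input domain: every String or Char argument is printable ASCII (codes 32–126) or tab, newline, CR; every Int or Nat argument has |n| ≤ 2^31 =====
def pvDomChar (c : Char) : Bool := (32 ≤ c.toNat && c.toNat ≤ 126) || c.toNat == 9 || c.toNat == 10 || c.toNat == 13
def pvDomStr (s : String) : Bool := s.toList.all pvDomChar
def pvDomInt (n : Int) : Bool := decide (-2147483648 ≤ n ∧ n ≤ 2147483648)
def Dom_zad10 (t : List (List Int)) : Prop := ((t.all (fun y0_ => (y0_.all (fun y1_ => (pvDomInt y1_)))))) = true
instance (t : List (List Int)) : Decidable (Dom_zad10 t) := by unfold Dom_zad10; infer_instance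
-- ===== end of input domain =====

-- B replaces A's fused n×n scan with two mutable flag arrays (zeraW/zeraK) by two
-- independent short-circuiting all/any passes over rows and columns (simpler; same O(n²)).

-- ===== PORT A =====
-- the 'while liczba > 0' digit loop that both Pythons contain verbatim
def digitLoop (l : Int) : Bool :=
  if _h : 0 < l then
    if PySem.Int.mod l 10 = 0 then true
    else digitLoop (PySem.Int.floordiv l 10)
  else false
termination_by l.toNat
decreasing_by
  rw [PySem.Int.floordiv_eq_ediv_of_pos (by norm_num)]
  omega

def czyCyfra0 (liczba : Int) : Bool :=
  digitLoop (if liczba < 0 then liczba * (-1) else liczba)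

-- t[0] is totalized with headD [] and t[i][j] with getD; Pre_zad10 excludes the
-- inputs where Python's indexing raises, so the defaults are never reached there.
def zad10 (t : List (List Int)) : Bool :=
  let n := (t.headD []).length
  let res := (List.range n).foldl
    (fun (s : List Bool × List Bool) i =>
      (List.range n).foldl
        (fun (s : List Bool × List Bool) j =>
          if czyCyfra0 ((t.getD i []).getD j 0) then (s.1.set i true, s.2.set j true) else s)
        s)
    (List.replicate n false, List.replicate n false)
  if res.2.contains false || res.1.contains false then false else true

-- ===== PORT B =====
def czyCyfra0_alt (liczba : Int) : Bool := digitLoop |liczba|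

def zad10_alt (t : List (List Int)) : Bool :=
  let n := (t.headD []).length
  ((List.range n).all fun i => (List.range n).any fun j => czyCyfra0_alt ((t.getD i []).getD j 0))
  && ((List.range n).all fun j => (List.range n).any fun i => czyCyfra0_alt ((t.getD i []).getD j 0))

-- ===== PRECONDITION & SPEC =====
-- Pre_ excludes exactly the inputs on which Python A raises IndexError:
-- empty t (t[0]) and grids whose first len(t[0]) rows/row-entries are too short for the n×n scan.
def Pre_zad10 (t : List (List Int)) : Prop :=
  t ≠ [] ∧ (t.headD []).length ≤ t.length ∧
    ∀ r ∈ t.take (t.headD []).length, (t.headD []).length ≤ r.length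
instance (t : List (List Int)) : Decidable (Pre_zad10 t) := by unfold Pre_zad10; infer_instance

def pvWitness_zad10 : List (List Int) := [[10, 3], [7, 20]]

def Spec_zad10 (t : List (List Int)) (out : Bool) : Prop := out = zad10_alt t
instance (t : List (List Int)) (out : Bool) : Decidable (Spec_zad10 t out) := by unfold Spec_zad10; infer_instance

-- ===== CLAIM (what is proved, stated in full; the proofs are below) =====
def Claim_equal_zad10 : Prop := ∀ (t : List (List Int)), Dom_zad10 t → Pre_zad10 t → Spec_zad10 t (zad10 t)

-- ===== LEMMAS AND PROOFS =====

theorem czyCyfra0_alt_eq (x : Int) : czyCyfra0_alt x = czyCyfra0 x := by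
  unfold czyCyfra0_alt czyCyfra0
  congr 1
  rcases lt_or_ge x 0 with h | h
  · simp [h, abs_of_neg h]
  · simp [not_lt.mpr h, abs_of_nonneg h]


theorem inner_fst (f : Nat → Nat → Bool) (i : Nat) (L : List Nat) (s : List Bool × List Bool) :
    (L.foldl (fun s j => if f i j then (s.1.set i true, s.2.set j true) else s) s).1
      = if L.any (f i) then s.1.set i true else s.1 := by
  induction L generalizing s with
  | nil => simp
  | cons a L ih =>
    simp only [List.foldl_cons, List.any_cons]
    by_cases h : f i a
    · simp only [h, if_pos, Bool.true_or, if_true, ih]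
      split <;> simp [List.set_set]
    · simp [h, ih]

theorem inner_snd_len (f : Nat → Nat → Bool) (i : Nat) (L : List Nat) (s : List Bool × List Bool) :
    (L.foldl (fun s j => if f i j then (s.1.set i true, s.2.set j true) else s) s).2.length
      = s.2.length := by
  induction L generalizing s with
  | nil => simp
  | cons a L ih =>
    simp only [List.foldl_cons]
    by_cases h : f i a <;> simp [h, ih]

theorem inner_snd_getD (f : Nat → Nat → Bool) (i : Nat) (L : List Nat) (s : List Bool × List Bool)
    (j : Nat) (hL : ∀ a ∈ L, a < s.2.length) :
    (L.foldl (fun s j => if f i j then (s.1.set i true, s.2.set j true) else s) s).2.getD j false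
      = (s.2.getD j false || (L.contains j && f i j)) := by
  induction L generalizing s with
  | nil => simp
  | cons a L ih =>
    have ha : a < s.2.length := hL a (List.mem_cons_self ..)
    simp only [List.foldl_cons]
    by_cases h : f i a
    · simp only [h, if_true]
      rw [ih _ (by simpa using fun x hx => hL x (List.mem_cons_of_mem _ hx))]
      by_cases hj : j = a
      · subst hj
        simp [List.getD_eq_getElem?_getD, ha, h]
      · simp [List.getD_eq_getElem?_getD, List.getElem?_set_ne (fun hh => hj hh.symm),
          List.contains_cons, hj]
    · simp only [h, if_false, Bool.false_eq_true]
      rw [ih _ (fun x hx => hL x (List.mem_cons_of_mem _ hx))]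
      by_cases hj : j = a
      · subst hj; simp [h]
      · simp [List.contains_cons, hj]

theorem outer_len (f : Nat → Nat → Bool) (n : Nat) (M : List Nat) (s : List Bool × List Bool) :
    (M.foldl (fun s i => (List.range n).foldl
        (fun s j => if f i j then (s.1.set i true, s.2.set j true) else s) s) s).1.length
      = s.1.length ∧
    (M.foldl (fun s i => (List.range n).foldl
        (fun s j => if f i j then (s.1.set i true, s.2.set j true) else s) s) s).2.length
      = s.2.length := by
  induction M generalizing s with
  | nil => simp
  | cons a M ih =>
    simp only [List.foldl_cons]
    refine ⟨(ih _).1.trans ?_, (ih _).2.trans ?_⟩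
    · rw [inner_fst]; split <;> simp
    · rw [inner_snd_len]

theorem outer_fst_getD (f : Nat → Nat → Bool) (n : Nat) (M : List Nat)
    (s : List Bool × List Bool) (i : Nat) (hM : ∀ a ∈ M, a < s.1.length) :
    (M.foldl (fun s i => (List.range n).foldl
        (fun s j => if f i j then (s.1.set i true, s.2.set j true) else s) s) s).1.getD i false
      = (s.1.getD i false || (M.contains i && (List.range n).any (f i))) := by
  induction M generalizing s with
  | nil => simp
  | cons a M ih =>
    have ha : a < s.1.length := hM a (List.mem_cons_self ..)
    simp only [List.foldl_cons]
    have hlen : ((List.range n).foldl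
        (fun s j => if f a j then (s.1.set a true, s.2.set j true) else s) s).1.length = s.1.length := by
      rw [inner_fst]; split <;> simp
    rw [ih _ (fun x hx => by rw [hlen]; exact hM x (List.mem_cons_of_mem _ hx)), inner_fst]
    by_cases hi : i = a
    · subst hi
      by_cases hany : (List.range n).any (f i)
      · simp [hany, List.getD_eq_getElem?_getD, List.getElem?_set_self, ha]
      · simp [hany]
    · by_cases hany : (List.range n).any (f a)
      · simp [hany, List.getD_eq_getElem?_getD, List.getElem?_set_ne (fun hh => hi hh.symm),
          List.contains_cons, hi]
      · simp [hany, List.contains_cons, hi]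

theorem outer_snd_getD (f : Nat → Nat → Bool) (n : Nat) (M : List Nat)
    (s : List Bool × List Bool) (j : Nat) (hn : n ≤ s.2.length) :
    (M.foldl (fun s i => (List.range n).foldl
        (fun s j => if f i j then (s.1.set i true, s.2.set j true) else s) s) s).2.getD j false
      = (s.2.getD j false || (M.any (fun a => (List.range n).contains j && f a j))) := by
  induction M generalizing s with
  | nil => simp
  | cons a M ih =>
    simp only [List.foldl_cons, List.any_cons]
    rw [ih, inner_snd_getD]
    · rw [Bool.or_assoc]
    · intro x hx; exact lt_of_lt_of_le (List.mem_range.mp hx) hn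
    · rw [inner_snd_len]; exact hn

theorem mem_false_iff (l : List Bool) : false ∈ l ↔ ∃ i < l.length, l.getD i false = false := by
  constructor
  · intro h
    obtain ⟨i, hi, hv⟩ := List.mem_iff_getElem.mp h
    exact ⟨i, hi, by rw [List.getD_eq_getElem _ _ hi, hv]⟩
  · rintro ⟨i, hi, hv⟩
    rw [List.getD_eq_getElem _ _ hi] at hv
    exact hv ▸ List.getElem_mem hi

theorem bool_helper (a b : Bool) (h : a = true ↔ b = false) : a = !b := by
  cases a <;> cases b <;> simp_all

theorem combined (f : Nat → Nat → Bool) (n : Nat) :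
    (if ((List.range n).foldl (fun s i => (List.range n).foldl
          (fun s j => if f i j then (s.1.set i true, s.2.set j true) else s) s)
          (List.replicate n false, List.replicate n false)).2.contains false
        || ((List.range n).foldl (fun s i => (List.range n).foldl
          (fun s j => if f i j then (s.1.set i true, s.2.set j true) else s) s)
          (List.replicate n false, List.replicate n false)).1.contains false
     then false else true)
    = (((List.range n).all fun i => (List.range n).any fun j => f i j)
      && ((List.range n).all fun j => (List.range n).any fun i => f i j)) := by
  obtain ⟨hlW, hlK⟩ := outer_len f n (List.range n) (List.replicate n false, List.replicate n false)
  have hW := fun i => outer_fst_getD f n (List.range n)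
      (List.replicate n false, List.replicate n false) i (by simp [List.mem_range])
  have hK := fun j => outer_snd_getD f n (List.range n)
      (List.replicate n false, List.replicate n false) j (by simp)
  simp only [List.length_replicate] at hlW hlK
  set res := (List.range n).foldl (fun s i => (List.range n).foldl
      (fun s j => if f i j then (s.1.set i true, s.2.set j true) else s) s)
      (List.replicate n false, List.replicate n false) with hres
  have h2 : res.1.contains false = true ↔
      ¬(((List.range n).all fun i => (List.range n).any fun j => f i j) = true) := by
    rw [List.contains_iff_mem, mem_false_iff, hlW]
    constructor
    · rintro ⟨i, hi, hv⟩ hall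
      rw [hW i] at hv
      simp [List.mem_range, hi] at hv
      simp only [List.all_eq_true, List.mem_range] at hall
      exact absurd (hall i hi) (by simpa using hv)
    · intro hnrow
      simp only [List.all_eq_true, List.mem_range] at hnrow
      push_neg at hnrow
      obtain ⟨i, hi, hv⟩ := hnrow
      refine ⟨i, hi, ?_⟩
      rw [hW i]
      simp [List.mem_range, hi]
      simpa using hv
  have h1 : res.2.contains false = true ↔
      ¬(((List.range n).all fun j => (List.range n).any fun i => f i j) = true) := by
    rw [List.contains_iff_mem, mem_false_iff, hlK]
    constructor
    · rintro ⟨j, hj, hv⟩ hall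
      rw [hK j] at hv
      simp [List.mem_range, hj] at hv
      simp only [List.all_eq_true, List.mem_range] at hall
      exact absurd (hall j hj) (by simpa using hv)
    · intro hncol
      simp only [List.all_eq_true, List.mem_range] at hncol
      push_neg at hncol
      obtain ⟨j, hj, hv⟩ := hncol
      refine ⟨j, hj, ?_⟩
      rw [hK j]
      simp [List.mem_range, hj]
      simpa using hv
  have hrow : ((List.range n).all fun i => (List.range n).any fun j => f i j)
      = !(res.1.contains false) :=
    bool_helper _ _ (by rw [← Bool.not_eq_true]; exact iff_not_comm.mp h2)
  have hcol : ((List.range n).all fun j => (List.range n).any fun i => f i j)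
      = !(res.2.contains false) :=
    bool_helper _ _ (by rw [← Bool.not_eq_true]; exact iff_not_comm.mp h1)
  rw [hrow, hcol]
  cases res.1.contains false <;> cases res.2.contains false <;> simp

-- ===== VERDICT (by name: the statement is the Claim_ definition above) =====
theorem zad10_spec : Claim_equal_zad10 := by
  unfold Claim_equal_zad10 Spec_zad10
  intro t _ _
  unfold zad10 zad10_alt
  simp only [czyCyfra0_alt_eq]
  exact combined (fun i j => czyCyfra0 ((t.getD i []).getD j 0)) (t.headD []).length
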